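-- pv_equiv track=rewrite | github.com/fatima178/FYP-AllocAIte | backend/processing/recommendations/recommend_processing.py | _suggest_hiring_roles
-- ===== SOURCE A (Python) =====
-- ROLE_HINTS = {
--     "Frontend developer": {"react", "vue", "angular", "frontend", "ui", "ux", "figma", "design"},
--     "Backend developer": {"python", "java", "node", "node.js", "express", "django", "flask", "fastapi", "spring", "backend", "api", "rest", "graphql", "sql", "postgres", "mysql", "mongodb", "redis"},
--     "Full-stack developer": {"frontend", "backend", "react", "javascript", "typescript", "node", "api", "sql"},
--     "DevOps engineer": {"devops", "docker", "kubernetes", "terraform", "aws", "azure", "gcp"},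
--     "Data specialist": {"data", "analytics", "etl", "bi", "sql", "python"},
--     "ML engineer": {"machine learning", "ml", "ai", "nlp", "tensorflow", "pytorch", "python"},
--     "QA engineer": {"testing", "qa", "automation"},
--     "Product designer": {"ui", "ux", "figma", "design"},
--     "Mobile developer": {"ios", "android", "react native", "swift", "kotlin"},
--     "Security engineer": {"security"},
-- }
--
-- def _suggest_hiring_roles(missing_skills):
--     if not missing_skills:
--         return []
--
--     missing = {str(skill).lower() for skill in missing_skills}
--     scored_roles = []
--     for role, role_skills in ROLE_HINTS.items():
--         overlap = len(missing & role_skills)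
--         if overlap > 0:
--             scored_roles.append((overlap, role))
--
--     scored_roles.sort(key=lambda item: (-item[0], item[1]))
--     return [role for _, role in scored_roles[:3]]
-- ===== SOURCE B (Python) =====
-- ROLE_HINTS = {
--     "Frontend developer": {"react", "vue", "angular", "frontend", "ui", "ux", "figma", "design"},
--     "Backend developer": {"python", "java", "node", "node.js", "express", "django", "flask", "fastapi", "spring", "backend", "api", "rest", "graphql", "sql", "postgres", "mysql", "mongodb", "redis"},
--     "Full-stack developer": {"frontend", "backend", "react", "javascript", "typescript", "node", "api", "sql"},
--     "DevOps engineer": {"devops", "docker", "kubernetes", "terraform", "aws", "azure", "gcp"},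
--     "Data specialist": {"data", "analytics", "etl", "bi", "sql", "python"},
--     "ML engineer": {"machine learning", "ml", "ai", "nlp", "tensorflow", "pytorch", "python"},
--     "QA engineer": {"testing", "qa", "automation"},
--     "Product designer": {"ui", "ux", "figma", "design"},
--     "Mobile developer": {"ios", "android", "react native", "swift", "kotlin"},
--     "Security engineer": {"security"},
-- }
--
-- # Inverted index built once: skill -> roles whose hint set contains it.
-- _SKILL_TO_ROLES = {}
-- for _role, _skills in ROLE_HINTS.items():
--     for _skill in _skills:
--         _SKILL_TO_ROLES.setdefault(_skill, []).append(_role)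
--
--
-- def _suggest_hiring_roles(missing_skills):
--     if not missing_skills:
--         return []
--
--     counts = {role: 0 for role in ROLE_HINTS}
--     for skill in {str(skill).lower() for skill in missing_skills}:
--         for role in _SKILL_TO_ROLES.get(skill, ()):
--             counts[role] += 1
--
--     scored = [(count, role) for role, count in counts.items() if count > 0]
--     scored.sort(key=lambda item: (-item[0], item[1]))
--     return [role for _, role in scored[:3]]
-- ===== Notes on version B (the rewrite author's own statement) =====
-- stated objective: alternative
-- what changed: B inverts A's traversal: instead of intersecting the missing-skill set with each role's hint set, it builds an inverted index (skill -> roles) once and makes a single pass over the missing skills, incrementing per-role counters before the same (-count, role) sort and top-3 slice.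
import Mathlib
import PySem

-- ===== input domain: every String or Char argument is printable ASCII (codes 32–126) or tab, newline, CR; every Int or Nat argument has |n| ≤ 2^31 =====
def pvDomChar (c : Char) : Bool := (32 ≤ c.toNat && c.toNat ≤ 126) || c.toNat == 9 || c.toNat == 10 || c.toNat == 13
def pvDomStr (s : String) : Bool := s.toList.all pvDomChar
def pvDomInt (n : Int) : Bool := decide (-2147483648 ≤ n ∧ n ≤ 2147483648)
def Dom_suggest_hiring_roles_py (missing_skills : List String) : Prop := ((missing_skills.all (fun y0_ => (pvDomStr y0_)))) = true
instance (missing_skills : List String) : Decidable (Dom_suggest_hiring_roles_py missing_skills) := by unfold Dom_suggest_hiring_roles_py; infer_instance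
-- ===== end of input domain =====

-- B replaces A's per-role set intersections by a single pass over the missing skills through a
-- prebuilt inverted index (skill -> roles) accumulating per-role counts (objective: alternative).

-- ===== PORT A =====
-- shared module constant ROLE_HINTS (Python dict of sets -> assoc list of PySem.Set)
def ROLE_HINTS : List (String × PySem.Set String) := [
  ("Frontend developer", PySem.Set.ofList ["react", "vue", "angular", "frontend", "ui", "ux", "figma", "design"]),
  ("Backend developer", PySem.Set.ofList ["python", "java", "node", "node.js", "express", "django", "flask", "fastapi", "spring", "backend", "api", "rest", "graphql", "sql", "postgres", "mysql", "mongodb", "redis"]),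
  ("Full-stack developer", PySem.Set.ofList ["frontend", "backend", "react", "javascript", "typescript", "node", "api", "sql"]),
  ("DevOps engineer", PySem.Set.ofList ["devops", "docker", "kubernetes", "terraform", "aws", "azure", "gcp"]),
  ("Data specialist", PySem.Set.ofList ["data", "analytics", "etl", "bi", "sql", "python"]),
  ("ML engineer", PySem.Set.ofList ["machine learning", "ml", "ai", "nlp", "tensorflow", "pytorch", "python"]),
  ("QA engineer", PySem.Set.ofList ["testing", "qa", "automation"]),
  ("Product designer", PySem.Set.ofList ["ui", "ux", "figma", "design"]),
  ("Mobile developer", PySem.Set.ofList ["ios", "android", "react native", "swift", "kotlin"]),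
  ("Security engineer", PySem.Set.ofList ["security"])]

def suggest_hiring_roles_py (missing_skills : List String) : List String :=
  if missing_skills = [] then []
  else
    let missing : PySem.Set String := PySem.Set.ofList (missing_skills.map (fun skill => PySem.Str.lower skill))
    let scored : List (Int × String) :=
      ROLE_HINTS.foldl (fun acc rs =>
        let overlap : Int := PySem.Set.len (PySem.Set.inter missing rs.2)
        if overlap > 0 then acc ++ [(overlap, rs.1)] else acc) []
    let sortedScored := PySem.List.sorted2 scored (fun item => -item.1) (fun item => item.2)
    (PySem.List.slice sortedScored none (some 3)).map (fun p => p.2)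

-- ===== PORT B =====
-- module-level inverted index; setdefault(k, []).append(r) observably sets d[k] = d.get(k, []) + [r]
def SKILL_TO_ROLES : PySem.Dict String (List String) :=
  ROLE_HINTS.foldl (fun d rs =>
    rs.2.foldl (fun d skill => d.modify skill [] (fun roles => roles ++ [rs.1])) d) PySem.Dict.empty

def suggest_hiring_roles_py_alt (missing_skills : List String) : List String :=
  if missing_skills = [] then []
  else
    let missing : PySem.Set String := PySem.Set.ofList (missing_skills.map (fun skill => PySem.Str.lower skill))
    let counts0 : PySem.Dict String Int := PySem.Dict.ofList (ROLE_HINTS.map (fun rs => (rs.1, (0 : Int))))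
    let counts : PySem.Dict String Int :=
      missing.foldl (fun d skill =>
        (SKILL_TO_ROLES.getD skill []).foldl (fun d role => d.insert role (d.getD role 0 + 1)) d) counts0
    let scored : List (Int × String) :=
      counts.items.foldl (fun acc rc => if rc.2 > 0 then acc ++ [(rc.2, rc.1)] else acc) []
    let sortedScored := PySem.List.sorted2 scored (fun item => -item.1) (fun item => item.2)
    (PySem.List.slice sortedScored none (some 3)).map (fun p => p.2)

-- ===== PRECONDITION & SPEC =====
def Spec_suggest_hiring_roles_py (missing_skills : List String) (out : List String) : Prop := out = suggest_hiring_roles_py_alt missing_skills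
instance (missing_skills : List String) (out : List String) : Decidable (Spec_suggest_hiring_roles_py missing_skills out) := by unfold Spec_suggest_hiring_roles_py; infer_instance

-- ===== CLAIM (what is proved, stated in full; the proofs are below) =====
def Claim_equal_suggest_hiring_roles_py : Prop := ∀ (missing_skills : List String), Dom_suggest_hiring_roles_py missing_skills → Spec_suggest_hiring_roles_py missing_skills (suggest_hiring_roles_py missing_skills)

-- ===== LEMMAS AND PROOFS =====

-- inner build-loop: appending role r for every skill of a Nodup list S
lemma build_inner (S : List String) (r : String) (d : PySem.Dict String (List String))
    (hS : S.Nodup) (s : String) :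
    (S.foldl (fun d skill => d.modify skill [] (fun roles => roles ++ [r])) d).getD s []
      = d.getD s [] ++ (if S.contains s then [r] else []) := by
  have h := PySem.Dict.getD_foldl_modify_append (l := S.map (fun sk => (sk, r))) (d := d) (c := s)
  rw [List.foldl_map] at h
  simp only at h
  rw [h]
  congr 1
  rw [List.filter_map]
  simp only [Function.comp_def]
  have hf : (S.filter (fun sk => (sk, r).1 == s)) = S.filter (fun sk => sk == s) := rfl
  rw [hf, List.filter_beq]
  by_cases hm : s ∈ S
  · rw [List.count_eq_one_of_mem hS hm]
    simp [List.contains_eq_mem, hm]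
  · rw [List.count_eq_zero_of_not_mem hm]
    simp [List.contains_eq_mem, hm]

-- the inverted index, characterised: roles whose hint set contains s, in ROLE_HINTS order
lemma lookup_eq (s : String) :
    SKILL_TO_ROLES.getD s []
      = ROLE_HINTS.flatMap (fun rs => if List.contains rs.2 s then [rs.1] else []) := by
  simp only [SKILL_TO_ROLES, ROLE_HINTS, List.foldl_cons, List.foldl_nil]
  rw [build_inner _ _ _ (by decide) s, build_inner _ _ _ (by decide) s,
      build_inner _ _ _ (by decide) s, build_inner _ _ _ (by decide) s,
      build_inner _ _ _ (by decide) s, build_inner _ _ _ (by decide) s,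
      build_inner _ _ _ (by decide) s, build_inner _ _ _ (by decide) s,
      build_inner _ _ _ (by decide) s, build_inner _ _ _ (by decide) s]
  simp only [PySem.Dict.getD_empty, List.flatMap_cons, List.flatMap_nil,
    List.append_nil, List.nil_append, List.append_assoc]

-- Set.update with elements already present is the identity
lemma set_update_of_subset (s : PySem.Set String) (l : List String)
    (h : ∀ x ∈ l, x ∈ s) : PySem.Set.update s l = s := by
  induction l generalizing s with
  | nil => rfl
  | cons x xs ih =>
      show PySem.Set.update (PySem.Set.add s x) xs = s
      rw [PySem.Set.add_of_mem (h x (by simp))]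
      exact ih s (fun y hy => h y (by simp [hy]))

-- counting loop, per-role value: initial value plus one per missing skill naming the role
lemma counts_getD (L : List String) (d : PySem.Dict String Int) (r : String) :
    (L.foldl (fun d skill =>
        (SKILL_TO_ROLES.getD skill []).foldl (fun d role => d.insert role (d.getD role 0 + 1)) d) d).getD r 0
      = d.getD r 0 + (L.map (fun s => ((SKILL_TO_ROLES.getD s []).count r : Int))).sum := by
  induction L generalizing d with
  | nil => simp only [List.foldl_nil, List.map_nil, List.sum_nil, add_zero]
  | cons x xs ih =>
      simp only [List.foldl_cons, List.map_cons, List.sum_cons]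
      rw [ih, PySem.Dict.getD_foldl_insert_add_one]
      ring

-- counting loop keeps the key list: every looked-up role is already a key
lemma counts_keys (L : List String) (d : PySem.Dict String Int)
    (hd : ∀ x ∈ ROLE_HINTS.map (fun rs => rs.1), x ∈ d.keys) :
    (L.foldl (fun d skill =>
        (SKILL_TO_ROLES.getD skill []).foldl (fun d role => d.insert role (d.getD role 0 + 1)) d) d).keys
      = d.keys := by
  induction L generalizing d with
  | nil => rfl
  | cons x xs ih =>
      simp only [List.foldl_cons]
      have hk : ((SKILL_TO_ROLES.getD x []).foldl (fun d role => d.insert role (d.getD role 0 + 1)) d).keys = d.keys := by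
        rw [PySem.Dict.keys_foldl_insert (f := fun d role => d.getD role 0 + 1)]
        apply set_update_of_subset
        intro y hy
        apply hd
        rw [lookup_eq] at hy
        simp only [List.mem_flatMap] at hy
        obtain ⟨rs, hrs, hmem⟩ := hy
        simp only [List.mem_map]
        refine ⟨rs, hrs, ?_⟩
        rcases hc : List.contains rs.2 x
        · rw [hc] at hmem; simp at hmem
        · rw [hc] at hmem; simp at hmem; exact hmem.symm
      rw [ih, hk]
      intro y hy; rw [hk]; exact hd y hy

-- counting in a conditional singleton
lemma count_ite (r n : String) (c : Prop) [Decidable c] :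
    List.count r (if c then [n] else []) = if c then (if n = r then 1 else 0) else 0 := by
  split_ifs with h1 h2 <;> simp_all

-- one missing skill s contributes to role r exactly when r's hint set contains s
lemma count_lookup (s r : String) (S : PySem.Set String) (hmem : (r, S) ∈ ROLE_HINTS) :
    (SKILL_TO_ROLES.getD s []).count r = if List.contains S s then 1 else 0 := by
  rw [lookup_eq]
  fin_cases hmem <;>
    simp [ROLE_HINTS, List.count_append, count_ite]

-- the initial counter maps every role to 0, and anything else to the default 0
lemma counts0_getD (r : String) :
    (PySem.Dict.ofList (ROLE_HINTS.map (fun rs => (rs.1, (0 : Int))))).getD r 0 = 0 := by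
  have h : PySem.Dict.ofList (ROLE_HINTS.map (fun rs => (rs.1, (0 : Int))))
      = PySem.Dict.mk [("Frontend developer", 0), ("Backend developer", 0), ("Full-stack developer", 0),
          ("DevOps engineer", 0), ("Data specialist", 0), ("ML engineer", 0), ("QA engineer", 0),
          ("Product designer", 0), ("Mobile developer", 0), ("Security engineer", 0)] := by rfl
  rw [h]
  simp only [PySem.Dict.getD, PySem.Dict.get?_mk_cons]
  split_ifs <;> rfl

-- final per-role count = size of the intersection with that role's hint set
lemma counts_value (M : List String) (r : String) (S : PySem.Set String) (hmem : (r, S) ∈ ROLE_HINTS) :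
    (M.foldl (fun d skill =>
        (SKILL_TO_ROLES.getD skill []).foldl (fun d role => d.insert role (d.getD role 0 + 1)) d)
        (PySem.Dict.ofList (ROLE_HINTS.map (fun rs => (rs.1, (0 : Int)))))).getD r 0
      = PySem.Set.len (PySem.Set.inter M S) := by
  rw [counts_getD, counts0_getD, zero_add]
  have hmap : M.map (fun s => ((SKILL_TO_ROLES.getD s []).count r : Int))
      = M.map (fun s => if List.contains S s then (1 : Int) else 0) := by
    apply List.map_congr_left
    intro s _
    rw [count_lookup s r S hmem]
    split_ifs <;> rfl
  rw [hmap, PySem.List.sum_map_ite_one_zero (p := fun x => List.contains S x)]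
  rw [List.countP_eq_length_filter]
  rfl

-- the two scored lists coincide
lemma scored_eq (M : List String) :
    (PySem.Dict.ofList (ROLE_HINTS.map (fun rs => (rs.1, (0 : Int)))) |> fun counts0 =>
      (M.foldl (fun d skill =>
        (SKILL_TO_ROLES.getD skill []).foldl (fun d role => d.insert role (d.getD role 0 + 1)) d) counts0).items.foldl
        (fun acc rc => if rc.2 > 0 then acc ++ [(rc.2, rc.1)] else acc) [])
      = ROLE_HINTS.foldl (fun acc rs =>
          let overlap : Int := PySem.Set.len (PySem.Set.inter M rs.2)
          if overlap > 0 then acc ++ [(overlap, rs.1)] else acc) [] := by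
  simp only []
  set counts := (M.foldl (fun d skill =>
        (SKILL_TO_ROLES.getD skill []).foldl (fun d role => d.insert role (d.getD role 0 + 1)) d)
        (PySem.Dict.ofList (ROLE_HINTS.map (fun rs => (rs.1, (0 : Int)))))) with hc
  have hkeys0 : (PySem.Dict.ofList (ROLE_HINTS.map (fun rs => (rs.1, (0 : Int))))).keys
      = ROLE_HINTS.map (fun rs => rs.1) := by rfl
  have hkeys : counts.keys = ROLE_HINTS.map (fun rs => rs.1) := by
    rw [hc, counts_keys, hkeys0]
    intro x hx; rw [hkeys0]; exact hx
  have hnd : counts.keys.Nodup := by rw [hkeys]; decide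
  have hitems : counts.items = (ROLE_HINTS.map (fun rs => rs.1)).map (fun k => (k, counts.getD k 0)) := by
    rw [← hkeys]; exact PySem.Dict.items_eq_map_keys counts hnd 0
  rw [hitems, List.foldl_map, List.foldl_map]
  apply PySem.List.foldl_congr_mem
  intro acc rs hrs
  simp only []
  have hv : counts.getD rs.1 0 = PySem.Set.len (PySem.Set.inter M rs.2) := by
    rw [hc]
    exact counts_value M rs.1 rs.2 hrs
  rw [hv]

-- ===== VERDICT (by name: the statement is the Claim_ definition above) =====
theorem suggest_hiring_roles_py_spec : Claim_equal_suggest_hiring_roles_py := by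
  intro L _
  show suggest_hiring_roles_py L = suggest_hiring_roles_py_alt L
  unfold suggest_hiring_roles_py suggest_hiring_roles_py_alt
  by_cases hL : L = []
  · rw [if_pos hL, if_pos hL]
  · rw [if_neg hL, if_neg hL]
    have h := scored_eq (PySem.Set.ofList (L.map (fun skill => PySem.Str.lower skill)))
    simp only [] at h ⊢
    rw [h]
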